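-- pv_equiv track=rewrite | github.com/sp1d5r/ViraNovaBackend | serverless_backend/services/bounding_box_services.py | smooth_two_boxes
-- ===== SOURCE A (Python) =====
-- def smooth_two_boxes(bboxes, window_size=3):
--     smoothed_boxes = []
--     for i in range(len(bboxes)):
--         if bboxes[i] is None:
--             smoothed_boxes.append(None)
--             continue
--
--         box1, box2 = bboxes[i]
--         smoothed_box1 = [0, 0, 0, 0]
--         smoothed_box2 = [0, 0, 0, 0]
--         count = 0
--         for j in range(max(0, i - window_size // 2), min(len(bboxes), i + window_size // 2 + 1)):
--             if bboxes[j] is not None: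
--                 b1, b2 = bboxes[j]
--                 for k in range(4):
--                     smoothed_box1[k] += b1[k]
--                     smoothed_box2[k] += b2[k]
--                 count += 1
--         if count > 0:
--             smoothed_boxes.append((
--                 tuple(x // count for x in smoothed_box1),
--                 tuple(x // count for x in smoothed_box2)
--             ))
--         else:
--             smoothed_boxes.append(None)
--     return smoothed_boxes
-- ===== SOURCE B (Python) =====
-- def smooth_two_boxes(bboxes, window_size=3):
--     n = len(bboxes)
--     half = window_size // 2
--     if half < 0:
--         return [None] * n
--     # prefix sums: c[m] = number of non-None boxes among the first m,
--     # p1[m]/p2[m] = coordinate-wise sums of their first/second boxes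
--     c = [0]
--     p1 = [[0, 0, 0, 0]]
--     p2 = [[0, 0, 0, 0]]
--     cc = 0
--     t1 = [0, 0, 0, 0]
--     t2 = [0, 0, 0, 0]
--     for bb in bboxes:
--         if bb is not None:
--             b1, b2 = bb
--             cc += 1
--             t1 = [t1[k] + b1[k] for k in range(4)]
--             t2 = [t2[k] + b2[k] for k in range(4)]
--         c.append(cc)
--         p1.append(t1)
--         p2.append(t2)
--     out = []
--     for i in range(n):
--         if bboxes[i] is None:
--             out.append(None)
--             continue
--         lo = max(0, i - half)
--         hi = min(n, i + half + 1)
--         cnt = c[hi] - c[lo]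
--         out.append((
--             tuple((p1[hi][k] - p1[lo][k]) // cnt for k in range(4)),
--             tuple((p2[hi][k] - p2[lo][k]) // cnt for k in range(4)),
--         ))
--     return out
-- ===== Notes on version B (the rewrite author's own statement) =====
-- stated objective: faster
-- what changed: replaces the per-index rescan of the whole window (inner j/k loops) by prefix-sum arrays of the non-None count and of each of the 4+4 coordinates, each window sum becoming a difference of two prefixes
import Mathlib
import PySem

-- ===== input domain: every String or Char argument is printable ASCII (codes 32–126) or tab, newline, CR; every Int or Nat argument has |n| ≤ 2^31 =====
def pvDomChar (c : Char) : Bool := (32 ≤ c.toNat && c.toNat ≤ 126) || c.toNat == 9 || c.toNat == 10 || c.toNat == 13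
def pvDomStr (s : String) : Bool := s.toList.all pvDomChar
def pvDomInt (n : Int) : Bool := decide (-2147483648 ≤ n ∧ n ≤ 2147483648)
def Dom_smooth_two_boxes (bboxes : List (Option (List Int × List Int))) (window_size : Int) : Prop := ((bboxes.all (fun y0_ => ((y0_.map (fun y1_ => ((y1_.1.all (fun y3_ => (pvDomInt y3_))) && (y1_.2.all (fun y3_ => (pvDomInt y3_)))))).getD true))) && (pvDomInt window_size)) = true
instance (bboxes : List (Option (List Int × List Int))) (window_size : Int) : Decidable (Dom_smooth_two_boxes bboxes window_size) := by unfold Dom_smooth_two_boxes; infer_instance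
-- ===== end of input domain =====

-- B replaces A's per-index rescan of the whole window by prefix-sum arrays (non-None count and
-- each of the 4+4 coordinates), so each window average is a difference of two prefixes (O(n) vs O(n*w)).


-- ===== PORT A =====
-- inner 'for k in range(4)' loop updating the two accumulator lists in place
def pvKLoopA (b1 b2 : List Int) (s : List Int × List Int) : List Int × List Int :=
  (PySem.List.pyRange 0 4 1).foldl (fun s k =>
    (PySem.List.pySetD s.1 k (PySem.List.pyGetD s.1 k 0 + PySem.List.pyGetD b1 k 0),
     PySem.List.pySetD s.2 k (PySem.List.pyGetD s.2 k 0 + PySem.List.pyGetD b2 k 0))) s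

-- body of the 'for j in range(...)' loop: state = (smoothed_box1, smoothed_box2, count)
def pvStepA (st : List Int × List Int × Int) (bb : Option (List Int × List Int)) :
    List Int × List Int × Int :=
  match bb with
  | none => st
  | some (b1, b2) =>
    let s := pvKLoopA b1 b2 (st.1, st.2.1)
    (s.1, s.2, st.2.2 + 1)

-- one iteration of the outer loop (the element appended for index i)
def pvCellA (bboxes : List (Option (List Int × List Int))) (window_size i : Int) :
    Option (List Int × List Int) :=
  match PySem.List.pyGetD bboxes i none with
  | none => none
  | some _ =>
    let st := (PySem.List.pyRange (max 0 (i - PySem.Int.floordiv window_size 2))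
        (min (bboxes.length : Int) (i + PySem.Int.floordiv window_size 2 + 1)) 1).foldl
        (fun st j => pvStepA st (PySem.List.pyGetD bboxes j none)) ([0,0,0,0], [0,0,0,0], 0)
    if st.2.2 > 0 then
      some (st.1.map (fun x => PySem.Int.floordiv x st.2.2),
            st.2.1.map (fun x => PySem.Int.floordiv x st.2.2))
    else none

def smooth_two_boxes (bboxes : List (Option (List Int × List Int))) (window_size : Int) :
    List (Option (List Int × List Int)) :=
  (PySem.List.pyRange 0 (bboxes.length : Int) 1).foldl
    (fun out i => out ++ [pvCellA bboxes window_size i]) []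

-- ===== PORT B =====
-- prefix-building loop body: state = (c, p1, p2, cc, t1, t2)
def pvStepB (st : List Int × List (List Int) × List (List Int) × Int × List Int × List Int)
    (bb : Option (List Int × List Int)) :
    List Int × List (List Int) × List (List Int) × Int × List Int × List Int :=
  match st, bb with
  | (c, p1, p2, cc, t1, t2), none => (c ++ [cc], p1 ++ [t1], p2 ++ [t2], cc, t1, t2)
  | (c, p1, p2, cc, t1, t2), some (b1, b2) =>
    let cc' := cc + 1
    let t1' := (PySem.List.pyRange 0 4 1).map
      (fun k => PySem.List.pyGetD t1 k 0 + PySem.List.pyGetD b1 k 0)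
    let t2' := (PySem.List.pyRange 0 4 1).map
      (fun k => PySem.List.pyGetD t2 k 0 + PySem.List.pyGetD b2 k 0)
    (c ++ [cc'], p1 ++ [t1'], p2 ++ [t2'], cc', t1', t2')

-- one iteration of B's output loop
def pvCellB (c : List Int) (p1 p2 : List (List Int)) (n half : Int)
    (bb : Option (List Int × List Int)) (i : Int) : Option (List Int × List Int) :=
  match bb with
  | none => none
  | some _ =>
    let lo := max 0 (i - half)
    let hi := min n (i + half + 1)
    let cnt := PySem.List.pyGetD c hi 0 - PySem.List.pyGetD c lo 0
    some ((PySem.List.pyRange 0 4 1).map (fun k => PySem.Int.floordiv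
            (PySem.List.pyGetD (PySem.List.pyGetD p1 hi []) k 0 -
             PySem.List.pyGetD (PySem.List.pyGetD p1 lo []) k 0) cnt),
          (PySem.List.pyRange 0 4 1).map (fun k => PySem.Int.floordiv
            (PySem.List.pyGetD (PySem.List.pyGetD p2 hi []) k 0 -
             PySem.List.pyGetD (PySem.List.pyGetD p2 lo []) k 0) cnt))

def smooth_two_boxes_alt (bboxes : List (Option (List Int × List Int))) (window_size : Int) :
    List (Option (List Int × List Int)) :=
  let n : Int := bboxes.length
  let half := PySem.Int.floordiv window_size 2
  if half < 0 then List.replicate bboxes.length none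
  else
    let st := bboxes.foldl pvStepB ([0], [[0,0,0,0]], [[0,0,0,0]], 0, [0,0,0,0], [0,0,0,0])
    (PySem.List.pyRange 0 n 1).foldl
      (fun out i =>
        out ++ [pvCellB st.1 st.2.1 st.2.2.1 n half (PySem.List.pyGetD bboxes i none) i]) []

-- ===== PRECONDITION & SPEC =====
def pvBoxOK : Option (List Int × List Int) → Bool
  | none => true
  | some (b1, b2) => decide (4 ≤ b1.length) && decide (4 ≤ b2.length)

-- Python A raises IndexError iff window_size ≥ 0 and some non-None box has a coordinate list
-- shorter than 4 (the box is averaged into its own window); those inputs are excluded.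
def Pre_smooth_two_boxes (bboxes : List (Option (List Int × List Int))) (window_size : Int) : Prop :=
  window_size < 0 ∨ ∀ bb ∈ bboxes, pvBoxOK bb = true
instance (bboxes : List (Option (List Int × List Int))) (window_size : Int) :
    Decidable (Pre_smooth_two_boxes bboxes window_size) := by
  unfold Pre_smooth_two_boxes; infer_instance

def pvWitness_smooth_two_boxes : (List (Option (List Int × List Int))) × Int :=
  ([some ([1,2,3,4],[5,6,7,8]), none, some ([0,0,0,0],[9,9,9,9])], 3)

def Spec_smooth_two_boxes (bboxes : List (Option (List Int × List Int))) (window_size : Int)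
    (out : List (Option (List Int × List Int))) : Prop :=
  out = smooth_two_boxes_alt bboxes window_size
instance (bboxes : List (Option (List Int × List Int))) (window_size : Int)
    (out : List (Option (List Int × List Int))) :
    Decidable (Spec_smooth_two_boxes bboxes window_size out) := by
  unfold Spec_smooth_two_boxes; infer_instance

-- ===== CLAIM (what is proved, stated in full; the proofs are below) =====
def Claim_equal_smooth_two_boxes : Prop :=
  ∀ (bboxes : List (Option (List Int × List Int))) (window_size : Int),
    Dom_smooth_two_boxes bboxes window_size → Pre_smooth_two_boxes bboxes window_size →
    Spec_smooth_two_boxes bboxes window_size (smooth_two_boxes bboxes window_size)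

-- ===== LEMMAS AND PROOFS =====
-- (the equality in fact holds for every input; Pre_ only excludes inputs where the Python A raises)

-- count of non-None boxes and coordinate-wise sums over a list of boxes
def pvCnt (bs : List (Option (List Int × List Int))) : Nat := bs.countP (fun bb => bb.isSome)
def pvS1 (bs : List (Option (List Int × List Int))) (k : Nat) : Int :=
  (bs.map (fun bb => match bb with | none => 0 | some p => p.1.getD k 0)).sum
def pvS2 (bs : List (Option (List Int × List Int))) (k : Nat) : Int :=
  (bs.map (fun bb => match bb with | none => 0 | some p => p.2.getD k 0)).sum
def pvVec1 (bs : List (Option (List Int × List Int))) : List Int :=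
  [pvS1 bs 0, pvS1 bs 1, pvS1 bs 2, pvS1 bs 3]
def pvVec2 (bs : List (Option (List Int × List Int))) : List Int :=
  [pvS2 bs 0, pvS2 bs 1, pvS2 bs 2, pvS2 bs 3]

lemma pvRange4 : PySem.List.pyRange 0 4 1 = [0,1,2,3] := by decide

set_option maxHeartbeats 1000000 in
lemma pvKLoopA_eval (b1 b2 : List Int) (a b c d e f g h : Int) :
    pvKLoopA b1 b2 ([a,b,c,d], [e,f,g,h]) =
      ([a + b1.getD 0 0, b + b1.getD 1 0, c + b1.getD 2 0, d + b1.getD 3 0],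
       [e + b2.getD 0 0, f + b2.getD 1 0, g + b2.getD 2 0, h + b2.getD 3 0]) := by
  rw [pvKLoopA, pvRange4]
  simp only [List.foldl_cons, List.foldl_nil]
  norm_num [PySem.List.pySetD_of_nonneg, PySem.List.pyGetD_of_nonneg,
    show Int.toNat 1 = 1 from rfl, show Int.toNat 2 = 2 from rfl, show Int.toNat 3 = 3 from rfl,
    List.set, List.getD, List.getElem?_cons, List.getElem_cons]

lemma pvMap4_eval (t b1 : List Int) (a b c d : Int) (ht : t = [a,b,c,d]) :
    (PySem.List.pyRange 0 4 1).map (fun k => PySem.List.pyGetD t k 0 + PySem.List.pyGetD b1 k 0)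
      = [a + b1.getD 0 0, b + b1.getD 1 0, c + b1.getD 2 0, d + b1.getD 3 0] := by
  subst ht; rw [pvRange4]
  norm_num [PySem.List.pyGetD_of_nonneg,
    show Int.toNat 1 = 1 from rfl, show Int.toNat 2 = 2 from rfl, show Int.toNat 3 = 3 from rfl,
    List.getD, List.getElem?_cons]

lemma pvCnt_append (xs ys : List (Option (List Int × List Int))) :
    pvCnt (xs ++ ys) = pvCnt xs + pvCnt ys := by
  simp [pvCnt, List.countP_append]
lemma pvS1_append (xs ys : List (Option (List Int × List Int))) (k : Nat) :
    pvS1 (xs ++ ys) k = pvS1 xs k + pvS1 ys k := by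
  simp [pvS1]
lemma pvS2_append (xs ys : List (Option (List Int × List Int))) (k : Nat) :
    pvS2 (xs ++ ys) k = pvS2 xs k + pvS2 ys k := by
  simp [pvS2]

-- the lists built by B's first loop
def pvCList (bs : List (Option (List Int × List Int))) : List Int :=
  (List.range (bs.length + 1)).map (fun m => (pvCnt (bs.take m) : Int))
def pvPList1 (bs : List (Option (List Int × List Int))) : List (List Int) :=
  (List.range (bs.length + 1)).map (fun m => pvVec1 (bs.take m))
def pvPList2 (bs : List (Option (List Int × List Int))) : List (List Int) :=
  (List.range (bs.length + 1)).map (fun m => pvVec2 (bs.take m))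

lemma pvCList_snoc (xs : List (Option (List Int × List Int))) (y : Option (List Int × List Int)) :
    pvCList (xs ++ [y]) = pvCList xs ++ [(pvCnt (xs ++ [y]) : Int)] := by
  unfold pvCList
  rw [List.length_append, List.length_cons, List.length_nil]
  rw [show xs.length + (0 + 1) + 1 = (xs.length + 1) + 1 from by omega, List.range_succ,
    List.map_append]
  simp only [List.map_cons, List.map_nil]
  rw [List.take_of_length_le (by simp)]
  congr 1
  apply List.map_congr_left
  intro m hm
  rw [List.mem_range] at hm
  rw [List.take_append_of_le_length (by omega)]

lemma pvPList1_snoc (xs : List (Option (List Int × List Int))) (y : Option (List Int × List Int)) :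
    pvPList1 (xs ++ [y]) = pvPList1 xs ++ [pvVec1 (xs ++ [y])] := by
  unfold pvPList1
  rw [List.length_append, List.length_cons, List.length_nil]
  rw [show xs.length + (0 + 1) + 1 = (xs.length + 1) + 1 from by omega, List.range_succ,
    List.map_append]
  simp only [List.map_cons, List.map_nil]
  rw [List.take_of_length_le (by simp)]
  congr 1
  apply List.map_congr_left
  intro m hm
  rw [List.mem_range] at hm
  rw [List.take_append_of_le_length (by omega)]

lemma pvPList2_snoc (xs : List (Option (List Int × List Int))) (y : Option (List Int × List Int)) :
    pvPList2 (xs ++ [y]) = pvPList2 xs ++ [pvVec2 (xs ++ [y])] := by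
  unfold pvPList2
  rw [List.length_append, List.length_cons, List.length_nil]
  rw [show xs.length + (0 + 1) + 1 = (xs.length + 1) + 1 from by omega, List.range_succ,
    List.map_append]
  simp only [List.map_cons, List.map_nil]
  rw [List.take_of_length_le (by simp)]
  congr 1
  apply List.map_congr_left
  intro m hm
  rw [List.mem_range] at hm
  rw [List.take_append_of_le_length (by omega)]

lemma pvBuild_spec (bs : List (Option (List Int × List Int))) :
    bs.foldl pvStepB ([0], [[0,0,0,0]], [[0,0,0,0]], 0, [0,0,0,0], [0,0,0,0]) =
      (pvCList bs, pvPList1 bs, pvPList2 bs, (pvCnt bs : Int), pvVec1 bs, pvVec2 bs) := by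
  induction bs using List.reverseRecOn with
  | nil =>
    simp [pvCList, pvPList1, pvPList2, pvCnt, pvVec1, pvVec2, pvS1, pvS2]
  | append_singleton xs x ih =>
    rw [List.foldl_append, ih, List.foldl_cons, List.foldl_nil,
      pvCList_snoc, pvPList1_snoc, pvPList2_snoc]
    cases x with
    | none =>
      simp [pvStepB, pvVec1, pvVec2, pvS1, pvS2, pvCnt]
    | some p =>
      obtain ⟨b1, b2⟩ := p
      simp only [pvStepB]
      rw [pvMap4_eval (pvVec1 xs) b1 _ _ _ _ rfl, pvMap4_eval (pvVec2 xs) b2 _ _ _ _ rfl]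
      simp [pvVec1, pvVec2, pvS1, pvS2, pvCnt]

lemma pvWindow_spec (bs : List (Option (List Int × List Int))) (lo m : Nat)
    (hm : lo + m ≤ bs.length) (a b c d e f g h : Int) (c0 : Int) :
    (PySem.List.pyRange (lo : Int) ((lo + m : Nat) : Int) 1).foldl
        (fun st j => pvStepA st (PySem.List.pyGetD bs j none)) ([a,b,c,d], [e,f,g,h], c0) =
      (([a + pvS1 ((bs.take (lo + m)).drop lo) 0, b + pvS1 ((bs.take (lo + m)).drop lo) 1,
         c + pvS1 ((bs.take (lo + m)).drop lo) 2, d + pvS1 ((bs.take (lo + m)).drop lo) 3],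
        [e + pvS2 ((bs.take (lo + m)).drop lo) 0, f + pvS2 ((bs.take (lo + m)).drop lo) 1,
         g + pvS2 ((bs.take (lo + m)).drop lo) 2, h + pvS2 ((bs.take (lo + m)).drop lo) 3],
        c0 + (pvCnt ((bs.take (lo + m)).drop lo) : Int))) := by
  induction m with
  | zero =>
    rw [show ((lo + 0 : Nat) : Int) = (lo : Int) from by push_cast; ring]
    rw [PySem.List.pyRange_one_eq_nil (le_refl _), List.foldl_nil]
    rw [List.drop_eq_nil_of_le (by simp)]
    simp [pvS1, pvS2, pvCnt]
  | succ m ih =>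
    have hlen : lo + m < bs.length := by omega
    rw [show ((lo + (m + 1) : Nat) : Int) = ((lo + m : Nat) : Int) + 1 from by push_cast; ring]
    rw [PySem.List.pyRange_one_succ_right (by exact_mod_cast Nat.le_add_right lo m),
      List.foldl_append, ih (by omega), List.foldl_cons, List.foldl_nil]
    have hidx : PySem.List.pyGetD bs ((lo + m : Nat) : Int) none = bs[lo + m]'hlen := by
      rw [PySem.List.pyGetD_natCast, List.getD_eq_getElem _ _ hlen]
    have hseg : (bs.take (lo + m + 1)).drop lo =
        ((bs.take (lo + m)).drop lo) ++ [bs[lo + m]'hlen] := by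
      rw [List.take_add_one, List.getElem?_eq_getElem hlen]
      rw [List.drop_append_of_le_length (by simp; omega)]
      rfl
    rw [hidx, show lo + (m + 1) = lo + m + 1 from by omega, hseg]
    cases hv : bs[lo + m]'hlen with
    | none =>
      simp [pvStepA, pvS1, pvS2, pvCnt]
    | some p =>
      obtain ⟨b1, b2⟩ := p
      simp only [pvStepA]
      rw [pvKLoopA_eval]
      simp [pvS1, pvS2, pvCnt, add_assoc]

lemma pvCList_get (bs : List (Option (List Int × List Int))) (i : Int) (h0 : 0 ≤ i)
    (h1 : i ≤ (bs.length : Int)) :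
    PySem.List.pyGetD (pvCList bs) i 0 = (pvCnt (bs.take i.toNat) : Int) := by
  rw [PySem.List.pyGetD_eq_getElem _ _ h0 (by simp [pvCList]; omega)]
  simp [pvCList]

lemma pvPList1_get (bs : List (Option (List Int × List Int))) (i : Int) (h0 : 0 ≤ i)
    (h1 : i ≤ (bs.length : Int)) :
    PySem.List.pyGetD (pvPList1 bs) i [] = pvVec1 (bs.take i.toNat) := by
  rw [PySem.List.pyGetD_eq_getElem _ _ h0 (by simp [pvPList1]; omega)]
  simp [pvPList1]

lemma pvPList2_get (bs : List (Option (List Int × List Int))) (i : Int) (h0 : 0 ≤ i)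
    (h1 : i ≤ (bs.length : Int)) :
    PySem.List.pyGetD (pvPList2 bs) i [] = pvVec2 (bs.take i.toNat) := by
  rw [PySem.List.pyGetD_eq_getElem _ _ h0 (by simp [pvPList2]; omega)]
  simp [pvPList2]

-- per-index equality, half ≥ 0 case
lemma pvCell_eq (bboxes : List (Option (List Int × List Int))) (w i : Int)
    (hh : ¬ PySem.Int.floordiv w 2 < 0) (h0 : 0 ≤ i) (h1 : i < (bboxes.length : Int)) :
    pvCellA bboxes w i =
      pvCellB (pvCList bboxes) (pvPList1 bboxes) (pvPList2 bboxes) (bboxes.length : Int)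
        (PySem.Int.floordiv w 2) (PySem.List.pyGetD bboxes i none) i := by
  cases hbi : PySem.List.pyGetD bboxes i none with
  | none => simp [pvCellA, pvCellB, hbi]
  | some bb =>
    simp only [pvCellA, pvCellB, hbi]
    set half := PySem.Int.floordiv w 2 with hhalf
    have hhalf0 : 0 ≤ half := not_lt.1 hh
    set lo := max 0 (i - half) with hlo
    set hi2 := min (bboxes.length : Int) (i + half + 1) with hhi2
    have hlo0 : 0 ≤ lo := le_max_left _ _
    have hloi : lo ≤ i := by omega
    have hihi : i < hi2 := by omega
    have hhin : hi2 ≤ (bboxes.length : Int) := min_le_left _ _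
    set lon := lo.toNat with hlon
    set mn := (hi2 - lo).toNat with hmn
    have e1 : lo = ((lon : Nat) : Int) := by omega
    have e2 : hi2 = ((lon + mn : Nat) : Int) := by push_cast; omega
    have hmle : lon + mn ≤ bboxes.length := by omega
    rw [e1, e2, pvWindow_spec bboxes lon mn hmle]
    set seg := (bboxes.take (lon + mn)).drop lon with hseg
    -- the window contains the (non-None) box at index i
    have hilen : i.toNat < bboxes.length := by omega
    have hbival : bboxes[i.toNat]'hilen = some bb := by
      rw [PySem.List.pyGetD_eq_getElem _ _ h0 h1] at hbi
      exact hbi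
    have hsegget : ∃ (hlt : i.toNat - lon < seg.length), seg[i.toNat - lon]'hlt = some bb := by
      have hlt : i.toNat - lon < seg.length := by
        simp only [hseg, List.length_drop, List.length_take]
        omega
      refine ⟨hlt, ?_⟩
      simp only [hseg, List.getElem_drop, List.getElem_take]
      have hidx2 : lon + (i.toNat - lon) = i.toNat := by omega
      simp only [hidx2]
      exact hbival
    have hcnt : 0 < pvCnt seg := by
      obtain ⟨hlt, hget⟩ := hsegget
      refine List.countP_pos_iff.2 ⟨some bb, ?_, by simp⟩
      rw [← hget]
      exact List.getElem_mem hlt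
    have hcnt' : (0 : Int) < 0 + (pvCnt seg : Int) := by
      simp only [zero_add]
      exact_mod_cast hcnt
    rw [if_pos hcnt']
    -- B's lookups
    rw [← e1, ← e2] at *
    rw [pvCList_get bboxes hi2 (by omega) (by omega),
        pvCList_get bboxes lo (by omega) (by omega),
        pvPList1_get bboxes hi2 (by omega) (by omega),
        pvPList1_get bboxes lo (by omega) (by omega),
        pvPList2_get bboxes hi2 (by omega) (by omega),
        pvPList2_get bboxes lo (by omega) (by omega)]
    have htk2 : hi2.toNat = lon + mn := by omega
    have htk1 : lo.toNat = lon := by omega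
    rw [htk2, htk1]
    -- prefix sums of the window are differences of prefixes
    have hsplit : bboxes.take (lon + mn) = bboxes.take lon ++ seg := by
      rw [hseg]
      conv_lhs => rw [← List.take_append_drop lon (bboxes.take (lon + mn))]
      rw [List.take_take, show min lon (lon + mn) = lon from by omega]
    have hS1 : ∀ k, pvS1 (bboxes.take (lon + mn)) k - pvS1 (bboxes.take lon) k = pvS1 seg k := by
      intro k; rw [hsplit, pvS1_append]; ring
    have hS2 : ∀ k, pvS2 (bboxes.take (lon + mn)) k - pvS2 (bboxes.take lon) k = pvS2 seg k := by
      intro k; rw [hsplit, pvS2_append]; ring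
    have hC : (pvCnt (bboxes.take (lon + mn)) : Int) - (pvCnt (bboxes.take lon) : Int)
        = (pvCnt seg : Int) := by
      rw [hsplit, pvCnt_append]; push_cast; ring
    simp only [pvVec1, pvVec2]
    rw [pvRange4]
    norm_num [PySem.List.pyGetD_of_nonneg,
      show Int.toNat 1 = 1 from rfl, show Int.toNat 2 = 2 from rfl, show Int.toNat 3 = 3 from rfl,
      List.getD, List.getElem?_cons]
    rw [hS1 0, hS1 1, hS1 2, hS1 3, hS2 0, hS2 1, hS2 2, hS2 3, hC]
    simp

-- ===== VERDICT (by name: the statement is the Claim_ definition above) =====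
theorem smooth_two_boxes_spec : Claim_equal_smooth_two_boxes := by
  intro bboxes w _ _
  unfold Spec_smooth_two_boxes smooth_two_boxes smooth_two_boxes_alt
  simp only [PySem.List.foldl_append_singleton_eq_map, List.nil_append]
  by_cases hh : PySem.Int.floordiv w 2 < 0
  · rw [if_pos hh, List.eq_replicate_iff]
    constructor
    · simp [PySem.List.length_pyRange_one]
    · intro x hx
      rw [List.mem_map] at hx
      obtain ⟨i, hi, rfl⟩ := hx
      rw [PySem.List.mem_pyRange_one] at hi
      cases hbi : PySem.List.pyGetD bboxes i none with
      | none => simp [pvCellA, hbi]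
      | some bb =>
        simp only [pvCellA, hbi]
        rw [PySem.List.pyRange_one_eq_nil (by omega), List.foldl_nil]
        norm_num
  · rw [if_neg hh, pvBuild_spec]
    apply List.map_congr_left
    intro i hi
    rw [PySem.List.mem_pyRange_one] at hi
    exact pvCell_eq bboxes w i hh hi.1 hi.2
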